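-- pv_equiv track=rewrite | github.com/AlexK-Notable/znote-mcp | src/znote_mcp/storage/markdown_parser.py | _strip_links_section
-- ===== SOURCE A (Python) =====
-- from typing import Dict, List, Optional
--
-- def _strip_links_section(content: str) -> str:
--     """Remove all ``## Links`` sections from markdown content."""
--     content_parts: List[str] = []
--     skip_section = False
--     for line in content.split("\n"):
--         if line.strip() == "## Links":
--             skip_section = True
--             continue
--         elif skip_section and line.startswith("## "):
--             skip_section = False
--         if not skip_section:
--             content_parts.append(line)
--     return "\n".join(content_parts).rstrip()
-- ===== SOURCE B (Python) =====
-- def _strip_links_section(content: str) -> str: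
--     """Remove all ``## Links`` sections: build sections, then filter them."""
--     done = []
--     current = []
--     for line in content.split("\n"):
--         if line.startswith("## ") or line.strip() == "## Links":
--             done.append(current)
--             current = [line]
--         else:
--             current = current + [line]
--     kept = []
--     for seg in done + [current]:
--         if not (seg and seg[0].strip() == "## Links"):
--             kept.extend(seg)
--     return "\n".join(kept).rstrip()
-- ===== Notes on version B (the rewrite author's own statement) =====
-- stated objective: alternative
-- what changed: Replaces A's single-pass skip-flag state machine with a two-pass decomposition: first partition the lines into sections (a new section starts at each level-2 header or links-marker line), then drop the sections whose first stripped line is the links header and join the rest.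
import Mathlib
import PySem

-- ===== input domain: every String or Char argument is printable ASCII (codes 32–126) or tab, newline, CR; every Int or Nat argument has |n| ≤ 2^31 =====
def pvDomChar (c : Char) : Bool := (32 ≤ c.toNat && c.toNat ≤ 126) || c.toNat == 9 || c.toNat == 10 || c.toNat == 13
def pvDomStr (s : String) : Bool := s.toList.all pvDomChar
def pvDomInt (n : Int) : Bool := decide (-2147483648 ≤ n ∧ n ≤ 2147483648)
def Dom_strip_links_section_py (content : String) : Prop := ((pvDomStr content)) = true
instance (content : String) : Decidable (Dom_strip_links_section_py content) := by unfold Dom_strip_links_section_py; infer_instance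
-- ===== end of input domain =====

-- B replaces A's skip-flag state machine by a build-sections-then-filter decomposition (objective: alternative).
-- Both ports work on List Char lines (PySem.Chars), wrapped to String at the boundary.

-- ===== PORT A =====
-- the loop body of A: state = (content_parts, skip_section)
def pvAStep (st : List (List Char) × Bool) (line : List Char) : List (List Char) × Bool :=
  if PySem.Chars.strip line == "## Links".toList then (st.1, true)
  else
    let skip := if st.2 && PySem.Chars.startswith line "## ".toList then false else st.2
    if !skip then (st.1 ++ [line], skip) else (st.1, skip)

def strip_links_section_py (content : String) : String :=
  let st := (PySem.Chars.splitOn content.toList ['\n']).foldl pvAStep ([], false)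
  String.ofList (PySem.Chars.rstrip (PySem.Chars.join ['\n'] st.1))

-- ===== PORT B =====
-- first pass: state = (done segments, current segment)
def pvBStep (st : List (List (List Char)) × List (List Char)) (line : List Char) :
    List (List (List Char)) × List (List Char) :=
  if PySem.Chars.startswith line "## ".toList || PySem.Chars.strip line == "## Links".toList then
    (st.1 ++ [st.2], [line])
  else (st.1, st.2 ++ [line])

-- 'seg and seg[0].strip() == "## Links"'
def pvDropSeg (seg : List (List Char)) : Bool :=
  !seg.isEmpty && (PySem.Chars.strip (seg.headD []) == "## Links".toList)

def strip_links_section_py_alt (content : String) : String :=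
  let st := (PySem.Chars.splitOn content.toList ['\n']).foldl pvBStep ([], [])
  let kept := (st.1 ++ [st.2]).foldl (fun kept seg => if pvDropSeg seg then kept else kept ++ seg) []
  String.ofList (PySem.Chars.rstrip (PySem.Chars.join ['\n'] kept))

-- ===== PRECONDITION & SPEC =====
def Spec_strip_links_section_py (content : String) (out : String) : Prop := out = strip_links_section_py_alt content
instance (content : String) (out : String) : Decidable (Spec_strip_links_section_py content out) := by unfold Spec_strip_links_section_py; infer_instance

-- ===== CLAIM (what is proved, stated in full; the proofs are below) =====
def Claim_equal_strip_links_section_py : Prop := ∀ (content : String), Dom_strip_links_section_py content → Spec_strip_links_section_py content (strip_links_section_py content)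

-- ===== LEMMAS AND PROOFS =====

-- value of a segment in B's second pass
def pvSegVal (seg : List (List Char)) : List (List Char) := if pvDropSeg seg then [] else seg

lemma pvKept_eq_flatMap (segs : List (List (List Char))) (acc : List (List Char)) :
    segs.foldl (fun kept seg => if pvDropSeg seg then kept else kept ++ seg) acc
      = acc ++ segs.flatMap pvSegVal := by
  induction segs generalizing acc with
  | nil => simp
  | cons s t ih =>
      simp only [List.foldl_cons, List.flatMap_cons, ih, pvSegVal]
      by_cases h : pvDropSeg s = true <;> simp [h]

-- main invariant: running A's loop from the state described by B's (done, cur)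
-- lands in the state described by B's final (done', cur')
lemma pvInv (ls : List (List Char)) (done : List (List (List Char))) (cur : List (List Char)) :
    ls.foldl pvAStep (done.flatMap pvSegVal ++ pvSegVal cur, pvDropSeg cur)
      = ((ls.foldl pvBStep (done, cur)).1.flatMap pvSegVal
           ++ pvSegVal (ls.foldl pvBStep (done, cur)).2,
         pvDropSeg (ls.foldl pvBStep (done, cur)).2) := by
  induction ls generalizing done cur with
  | nil => rfl
  | cons l t ih =>
      simp only [List.foldl_cons]
      by_cases hL : PySem.Chars.strip l = ['#', '#', ' ', 'L', 'i', 'n', 'k', 's']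
      · -- l starts a (dropped) "## Links" segment
        have hB : pvBStep (done, cur) l = (done ++ [cur], [l]) := by
          simp [pvBStep, hL]
        have hA : pvAStep (done.flatMap pvSegVal ++ pvSegVal cur, pvDropSeg cur) l
            = (done.flatMap pvSegVal ++ pvSegVal cur, true) := by
          simp [pvAStep, hL]
        rw [hA, hB]
        have := ih (done ++ [cur]) [l]
        simpa [pvSegVal, pvDropSeg, hL] using this
      · by_cases hH : PySem.Chars.startswith l ['#', '#', ' '] = true
        · -- l starts a kept segment
          have hB : pvBStep (done, cur) l = (done ++ [cur], [l]) := by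
            simp [pvBStep, hH]
          have hA : pvAStep (done.flatMap pvSegVal ++ pvSegVal cur, pvDropSeg cur) l
              = ((done.flatMap pvSegVal ++ pvSegVal cur) ++ [l], false) := by
            cases h : pvDropSeg cur <;> simp [pvAStep, hL, hH]
          rw [hA, hB]
          have hbeq : (PySem.Chars.strip l == ['#', '#', ' ', 'L', 'i', 'n', 'k', 's']) = false :=
            beq_eq_false_iff_ne.mpr hL
          have := ih (done ++ [cur]) [l]
          simpa [pvSegVal, pvDropSeg, hL, hbeq] using this
        · -- l extends the current segment
          have hB : pvBStep (done, cur) l = (done, cur ++ [l]) := by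
            simp [pvBStep, hH, hL]
          have hdrop : pvDropSeg (cur ++ [l]) = pvDropSeg cur := by
            cases cur <;> simp [pvDropSeg, hL]
          have hval : pvSegVal (cur ++ [l])
              = pvSegVal cur ++ (if pvDropSeg cur then [] else [l]) := by
            cases h : pvDropSeg cur <;> simp [pvSegVal, hdrop, h]
          have hA : pvAStep (done.flatMap pvSegVal ++ pvSegVal cur, pvDropSeg cur) l
              = (done.flatMap pvSegVal ++ pvSegVal (cur ++ [l]), pvDropSeg (cur ++ [l])) := by
            cases h : pvDropSeg cur <;>
              simp [pvAStep, hL, hH, hval, hdrop, h, List.append_assoc]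
          rw [hA, hB]
          exact ih done (cur ++ [l])

-- ===== VERDICT (by name: the statement is the Claim_ definition above) =====
theorem strip_links_section_py_spec : Claim_equal_strip_links_section_py := by
  intro content _
  unfold Spec_strip_links_section_py strip_links_section_py strip_links_section_py_alt
  have h := pvInv (PySem.Chars.splitOn content.toList ['\n']) [] []
  have hnil : (([] : List (List (List Char))).flatMap pvSegVal ++ pvSegVal ([] : List (List Char)))
      = ([] : List (List Char)) := by simp [pvSegVal, pvDropSeg]
  rw [hnil] at h
  have hd : pvDropSeg ([] : List (List Char)) = false := by simp [pvDropSeg]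
  rw [hd] at h
  simp only [pvKept_eq_flatMap, List.nil_append, List.flatMap_append,
    List.flatMap_cons, List.flatMap_nil, List.append_nil]
  rw [h]
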